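-- pv_equiv track=rewrite | github.com/keras-team/keras | Lib/site-packages/jax/_src/api_util.py | rebase_donate_argnums
-- ===== SOURCE A (Python) =====
-- def rebase_donate_argnums(donate_argnums, static_argnums) -> tuple[int, ...]:
--   """Shifts donate to account for static.
--
--   >>> rebase_donate_argnums((3, 4), (0, 1))
--   (1, 2)
--
--   Args:
--     donate_argnums: An iterable of ints.
--     static_argnums: An iterable of ints.
--
--   Returns:
--     A tuple of unique, sorted integer values based on donate_argnums with each
--     element offset to account for static_argnums.
--   """
--   if not (static_argnums or donate_argnums):
--     return tuple(sorted(donate_argnums))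
--
--   static_argnums = sorted(set(static_argnums))
--   donate_argnums = sorted(set(donate_argnums))
--   i = j = o = 0
--   out = []
--   while j < len(donate_argnums):
--     if i < len(static_argnums) and static_argnums[i] == donate_argnums[j]:
--       raise ValueError(f"`static_argnums` {static_argnums} and "
--                        f"`donate_argnums` {donate_argnums} cannot intersect.")
--
--     if i < len(static_argnums) and static_argnums[i] < donate_argnums[j]:
--       o += 1
--       i += 1
--     else:
--       out.append(donate_argnums[j] - o)
--       j += 1
--   return tuple(out)
-- ===== SOURCE B (Python) =====
-- def rebase_donate_argnums(donate_argnums, static_argnums) -> tuple[int, ...]: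
--   """Shifts donate to account for static (direct per-element offset)."""
--   static_sorted = sorted(set(static_argnums))
--   donate_sorted = sorted(set(donate_argnums))
--   if any(d in static_sorted for d in donate_sorted):
--     raise ValueError(f"`static_argnums` {static_sorted} and "
--                      f"`donate_argnums` {donate_sorted} cannot intersect.")
--   return tuple(d - sum(1 for s in static_sorted if s < d) for d in donate_sorted)
-- ===== Notes on version B (the rewrite author's own statement) =====
-- stated objective: simpler
-- what changed: Replaces A's three-counter merge loop over both sorted lists with an up-front set-intersection check and a single comprehension mapping each donate index d to d minus the count of static indices smaller than d.
import Mathlib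
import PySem

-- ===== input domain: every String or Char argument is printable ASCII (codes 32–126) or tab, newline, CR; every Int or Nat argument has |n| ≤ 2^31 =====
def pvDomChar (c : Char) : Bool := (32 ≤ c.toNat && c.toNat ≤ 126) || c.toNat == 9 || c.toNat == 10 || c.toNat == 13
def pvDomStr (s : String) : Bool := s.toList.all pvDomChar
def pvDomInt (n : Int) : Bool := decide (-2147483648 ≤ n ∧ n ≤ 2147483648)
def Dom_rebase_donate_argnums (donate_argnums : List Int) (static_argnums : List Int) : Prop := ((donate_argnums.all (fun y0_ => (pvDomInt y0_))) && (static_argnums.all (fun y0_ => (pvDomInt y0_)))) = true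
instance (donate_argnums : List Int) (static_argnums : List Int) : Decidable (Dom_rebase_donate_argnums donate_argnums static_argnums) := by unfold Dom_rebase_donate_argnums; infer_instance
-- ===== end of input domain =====

-- B replaces A's three-counter merge loop with an up-front membership check plus a
-- one-pass comprehension offsetting each donate index by the count of smaller static
-- indices (objective: simpler). Equivalence of RETURN values on Pre_ (no intersection,
-- where A raises ValueError — and so does B).

-- ===== PORT A =====
-- A's while loop over (i, j, o, out), transliterated as structural recursion on the
-- remaining suffixes of the two sorted lists; 'none' = the ValueError raise.
def rebase_donate_argnums_loop : List Int → List Int → Int → List Int → Option (List Int)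
  | _, [], _, out => some out
  | s :: ss', d :: ds', o, out =>
      if s = d then none
      else if s < d then rebase_donate_argnums_loop ss' (d :: ds') (o + 1) out
      else rebase_donate_argnums_loop (s :: ss') ds' o (out ++ [d - o])
  | [], d :: ds', o, out => rebase_donate_argnums_loop [] ds' o (out ++ [d - o])
termination_by ss ds => ss.length + ds.length

def rebase_donate_argnums (donate_argnums : List Int) (static_argnums : List Int) : List Int :=
  if static_argnums = [] ∧ donate_argnums = [] then
    PySem.List.sorted donate_argnums (fun x => x) false
  else
    let ss := PySem.List.sorted (PySem.Set.ofList static_argnums) (fun x => x) false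
    let ds := PySem.List.sorted (PySem.Set.ofList donate_argnums) (fun x => x) false
    -- 'none' (the raise) is excluded by Pre_
    (rebase_donate_argnums_loop ss ds 0 []).getD []

-- ===== PORT B =====
def rebase_donate_argnums_alt (donate_argnums : List Int) (static_argnums : List Int) : List Int :=
  let static_sorted := PySem.List.sorted (PySem.Set.ofList static_argnums) (fun x => x) false
  let donate_sorted := PySem.List.sorted (PySem.Set.ofList donate_argnums) (fun x => x) false
  if donate_sorted.any (fun d => static_sorted.contains d) then
    []  -- the raise, excluded by Pre_
  else
    donate_sorted.map (fun d => d - (static_sorted.countP (fun s => decide (s < d)) : Int))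

-- ===== PRECONDITION & SPEC =====
-- Pre_ excludes exactly the inputs on which A raises ValueError (donate and static share an element).
def Pre_rebase_donate_argnums (donate_argnums : List Int) (static_argnums : List Int) : Prop :=
  ∀ d ∈ donate_argnums, d ∉ static_argnums
instance (donate_argnums : List Int) (static_argnums : List Int) : Decidable (Pre_rebase_donate_argnums donate_argnums static_argnums) := by unfold Pre_rebase_donate_argnums; infer_instance

def pvWitness_rebase_donate_argnums : List Int × List Int := ([3, 4], [0, 1])

def Spec_rebase_donate_argnums (donate_argnums : List Int) (static_argnums : List Int) (out : List Int) : Prop := out = rebase_donate_argnums_alt donate_argnums static_argnums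
instance (donate_argnums : List Int) (static_argnums : List Int) (out : List Int) : Decidable (Spec_rebase_donate_argnums donate_argnums static_argnums out) := by unfold Spec_rebase_donate_argnums; infer_instance

-- ===== CLAIM (what is proved, stated in full; the proofs are below) =====
def Claim_equal_rebase_donate_argnums : Prop := ∀ (donate_argnums : List Int) (static_argnums : List Int), Dom_rebase_donate_argnums donate_argnums static_argnums → Pre_rebase_donate_argnums donate_argnums static_argnums → Spec_rebase_donate_argnums donate_argnums static_argnums (rebase_donate_argnums donate_argnums static_argnums)

-- ===== LEMMAS AND PROOFS =====

-- Invariant of A's merge loop on strictly sorted, disjoint lists: it returns the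
-- accumulator followed by each donate index offset by o plus the number of smaller
-- static indices.
theorem rebase_loop_eq (ss ds : List Int) (o : Int) (out : List Int)
    (hss : ss.Pairwise (· < ·)) (hds : ds.Pairwise (· < ·))
    (hdisj : ∀ d ∈ ds, d ∉ ss) :
    rebase_donate_argnums_loop ss ds o out =
      some (out ++ ds.map (fun d => d - (o + (ss.countP (fun s => decide (s < d)) : Int)))) := by
  induction ss, ds, o, out using rebase_donate_argnums_loop.induct with
  | case1 ss o out =>
      simp [rebase_donate_argnums_loop]
  | case2 ss' d ds' o out =>
      exact absurd List.mem_cons_self (hdisj d List.mem_cons_self)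
  | case3 s ss' d ds' o out hne hlt ih =>
      rw [rebase_donate_argnums_loop]
      simp only [if_neg hne, if_pos hlt]
      rw [ih hss.tail hds (fun e he hm => hdisj e he (List.mem_cons_of_mem _ hm))]
      congr 1
      congr 1
      apply List.map_congr_left
      intro e he
      have hsd : s < e := by
        rcases List.mem_cons.mp he with h | h
        · omega
        · have := (List.pairwise_cons.mp hds).1 e h; omega
      simp only [List.countP_cons, hsd, decide_true]
      push_cast
      omega
  | case4 s ss' d ds' o out hne hnlt ih =>
      rw [rebase_donate_argnums_loop]
      simp only [if_neg hne, if_neg hnlt]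
      rw [ih hss hds.tail (fun e he => hdisj e (List.mem_cons_of_mem _ he))]
      have hc : (s :: ss').countP (fun x => decide (x < d)) = 0 := by
        rw [List.countP_eq_zero]
        intro a ha
        rcases List.mem_cons.mp ha with h | h
        · simp; omega
        · have := (List.pairwise_cons.mp hss).1 a h; simp; omega
      simp [hc]
  | case5 d ds' o out ih =>
      rw [rebase_donate_argnums_loop]
      rw [ih List.Pairwise.nil hds.tail (fun e he => hdisj e (List.mem_cons_of_mem _ he))]
      simp

theorem rebase_donate_argnums_spec : Claim_equal_rebase_donate_argnums := by
  intro donate static _ hpre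
  unfold Spec_rebase_donate_argnums rebase_donate_argnums rebase_donate_argnums_alt
  by_cases hnil : static = [] ∧ donate = []
  · obtain ⟨h1, h2⟩ := hnil
    subst h1; subst h2
    decide
  · simp only [hnil, if_false]
    set ss := PySem.List.sorted (PySem.Set.ofList static) (fun x => x) false with hss
    set ds := PySem.List.sorted (PySem.Set.ofList donate) (fun x => x) false with hds
    have hmem_ss : ∀ x, x ∈ ss → x ∈ static := by
      intro x hx
      rw [hss, PySem.List.mem_sorted] at hx
      exact (PySem.Set.mem_ofList _ _).mp hx
    have hmem_ds : ∀ x, x ∈ ds → x ∈ donate := by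
      intro x hx
      rw [hds, PySem.List.mem_sorted] at hx
      exact (PySem.Set.mem_ofList _ _).mp hx
    have hdisj : ∀ d ∈ ds, d ∉ ss := fun d hd hm =>
      hpre d (hmem_ds d hd) (hmem_ss d hm)
    have hany : ds.any (fun d => ss.contains d) = false := by
      rw [List.any_eq_false]
      intro d hd
      simp only [List.contains_eq_mem, decide_eq_true_eq] at *
      exact fun h => hdisj d hd h
    rw [rebase_loop_eq ss ds 0 []
        (PySem.List.sorted_ofList_pairwise_lt static)
        (PySem.List.sorted_ofList_pairwise_lt donate) hdisj]
    simp only [hany, Option.getD_some, List.nil_append]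
    apply List.map_congr_left
    intro e _
    omega
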